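-- pv_equiv track=rewrite | github.com/narien/AoC2019 | day1/RocketEquation.py | CalculateFuelCost
-- ===== SOURCE A (Python) =====
-- def calcCost(weight):
--     return (weight // 3) - 2
--
-- def recursiveFuelCost(fuel):
--     extraFuel = calcCost(fuel)
--     return 0 if extraFuel <= 0 else extraFuel + recursiveFuelCost(extraFuel)
--
-- def CalculateFuelCost(moduleArr):
--     modulesTotal = 0
--     additionalFuelTotal = 0
--     for mass in moduleArr:
--         moduleFuel = calcCost(mass)
--         modulesTotal += moduleFuel
--         additionalFuelTotal += recursiveFuelCost(moduleFuel)
--     return modulesTotal, additionalFuelTotal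
-- ===== SOURCE B (Python) =====
-- def CalculateFuelCost(moduleArr):
--     modulesTotal = 0
--     additionalFuelTotal = 0
--     for mass in moduleArr:
--         current = mass // 3 - 2
--         modulesTotal += current
--         while True:
--             extra = current // 3 - 2
--             if extra <= 0:
--                 break
--             additionalFuelTotal += extra
--             current = extra
--     return modulesTotal, additionalFuelTotal
-- ===== Notes on version B (the rewrite author's own statement) =====
-- stated objective: simpler
-- what changed: The recursive helper chain (calcCost + recursiveFuelCost) is replaced by a single function with an inline iterative while loop accumulating the additional fuel directly.
import Mathlib
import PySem

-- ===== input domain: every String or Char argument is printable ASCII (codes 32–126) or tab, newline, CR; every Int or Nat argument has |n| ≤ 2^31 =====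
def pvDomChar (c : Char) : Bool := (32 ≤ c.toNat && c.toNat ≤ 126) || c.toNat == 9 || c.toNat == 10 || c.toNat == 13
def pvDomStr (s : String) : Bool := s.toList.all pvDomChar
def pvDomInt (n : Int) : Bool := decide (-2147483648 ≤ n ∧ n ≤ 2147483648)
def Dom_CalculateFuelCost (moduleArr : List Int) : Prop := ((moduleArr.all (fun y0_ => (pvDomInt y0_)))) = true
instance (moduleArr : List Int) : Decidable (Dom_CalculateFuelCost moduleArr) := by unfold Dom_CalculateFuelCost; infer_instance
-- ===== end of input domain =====

-- ===== PORT A =====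
-- B replaces the recursive fuel helper with one inline iterative loop; same values (simpler decomposition, not faster).
def calcCost (weight : Int) : Int := PySem.Int.floordiv weight 3 - 2

-- fuel-guarded structural recursion: fuel ≥ fuel-argument's chain length (the chain value strictly decreases), so the guard never fires
def recGo : Nat → Int → Int
  | 0, _ => 0
  | n + 1, fuel => if calcCost fuel ≤ 0 then 0 else calcCost fuel + recGo n (calcCost fuel)

def recursiveFuelCost (fuel : Int) : Int := recGo fuel.toNat fuel

def CalculateFuelCost (moduleArr : List Int) : Int × Int :=
  moduleArr.foldl (fun st mass =>
    let moduleFuel := calcCost mass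
    (st.1 + moduleFuel, st.2 + recursiveFuelCost moduleFuel)) (0, 0)

-- ===== PORT B =====
-- the inline 'while True' loop of Source B, carrying (current, additionalFuelTotal); same fuel guard for totality
def loopGo : Nat → Int → Int → Int
  | 0, _, addl => addl
  | n + 1, current, addl =>
    if PySem.Int.floordiv current 3 - 2 ≤ 0 then addl
    else loopGo n (PySem.Int.floordiv current 3 - 2) (addl + (PySem.Int.floordiv current 3 - 2))

def fuelLoop (current addl : Int) : Int := loopGo current.toNat current addl

def CalculateFuelCost_alt (moduleArr : List Int) : Int × Int :=
  moduleArr.foldl (fun st mass =>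
    let current := PySem.Int.floordiv mass 3 - 2
    (st.1 + current, fuelLoop current st.2)) (0, 0)

-- ===== PRECONDITION & SPEC =====
def Spec_CalculateFuelCost (moduleArr : List Int) (out : Int × Int) : Prop := out = CalculateFuelCost_alt moduleArr
instance (moduleArr : List Int) (out : Int × Int) : Decidable (Spec_CalculateFuelCost moduleArr out) := by unfold Spec_CalculateFuelCost; infer_instance

-- ===== CLAIM (what is proved, stated in full; the proofs are below) =====
def Claim_equal_CalculateFuelCost : Prop := ∀ (moduleArr : List Int), Dom_CalculateFuelCost moduleArr → Spec_CalculateFuelCost moduleArr (CalculateFuelCost moduleArr)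

-- ===== LEMMAS AND PROOFS =====
theorem floordiv3 (c : Int) : PySem.Int.floordiv c 3 = c / 3 :=
  PySem.Int.floordiv_eq_ediv_of_pos (by omega)

theorem loopGo_eq (n : Nat) : ∀ (c a : Int), c.toNat ≤ n → loopGo n c a = a + recGo n c := by
  induction n with
  | zero => intro c a _; rw [loopGo, recGo]; ring
  | succ n ih =>
    intro c a hn
    rw [loopGo, recGo]
    by_cases h : PySem.Int.floordiv c 3 - 2 ≤ 0
    · rw [if_pos h, if_pos (show calcCost c ≤ 0 from h)]; ring
    · rw [if_neg h, if_neg (show ¬ calcCost c ≤ 0 from h)]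
      have h3 := floordiv3 c
      rw [ih (PySem.Int.floordiv c 3 - 2) (a + (PySem.Int.floordiv c 3 - 2))
            (by rw [h3] at h ⊢; omega)]
      have hc : calcCost c = PySem.Int.floordiv c 3 - 2 := rfl
      rw [hc]; ring

theorem fuelLoop_eq (c a : Int) : fuelLoop c a = a + recursiveFuelCost c :=
  loopGo_eq c.toNat c a (le_refl _)

theorem foldl_eq (moduleArr : List Int) (st : Int × Int) :
    moduleArr.foldl (fun st mass =>
      let moduleFuel := calcCost mass
      (st.1 + moduleFuel, st.2 + recursiveFuelCost moduleFuel)) st =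
    moduleArr.foldl (fun st mass =>
      let current := PySem.Int.floordiv mass 3 - 2
      (st.1 + current, fuelLoop current st.2)) st := by
  induction moduleArr generalizing st with
  | nil => rfl
  | cons m tl ih =>
    simp only [List.foldl_cons]
    rw [ih]
    congr 1
    simp only [calcCost, fuelLoop_eq]

-- ===== VERDICT (by name: the statement is the Claim_ definition above) =====
theorem CalculateFuelCost_spec : Claim_equal_CalculateFuelCost := by
  intro moduleArr _
  unfold Spec_CalculateFuelCost CalculateFuelCost CalculateFuelCost_alt
  exact foldl_eq moduleArr (0, 0)
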